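-- pv_equiv track=rewrite | github.com/Steven-ZhangJM/CS263_Final_Project | solution_gen/p036_4.py | palindrome_in_dec
-- ===== SOURCE A (Python) =====
-- def palindrome_in_dec(num):  # O(n)
--     if(num < 10):
--         return True
--     if num % 10 == 0 and num >= 10:
--         return False
--     if (num % 10) == (num // 10) % 10:
--         return True
--     return palindrome_in_dec(num//10)
-- ===== SOURCE B (Python) =====
-- def palindrome_in_dec(num):
--     # two staged passes: extract all digits first, then scan the list
--     digits = []
--     n = num
--     while n >= 10:
--         digits.append(n % 10)
--         n //= 10
--     digits.append(n)
--     for i in range(len(digits) - 1):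
--         if digits[i] == 0:
--             return False
--         if digits[i] == digits[i + 1]:
--             return True
--     return True
-- ===== Notes on version B (the rewrite author's own statement) =====
-- stated objective: alternative
-- what changed: Replaced the fused recursion with two staged passes: one loop extracts the full least-significant-first digit list, a second loop scans it for a zero digit or an equal adjacent pair.
import Mathlib
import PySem

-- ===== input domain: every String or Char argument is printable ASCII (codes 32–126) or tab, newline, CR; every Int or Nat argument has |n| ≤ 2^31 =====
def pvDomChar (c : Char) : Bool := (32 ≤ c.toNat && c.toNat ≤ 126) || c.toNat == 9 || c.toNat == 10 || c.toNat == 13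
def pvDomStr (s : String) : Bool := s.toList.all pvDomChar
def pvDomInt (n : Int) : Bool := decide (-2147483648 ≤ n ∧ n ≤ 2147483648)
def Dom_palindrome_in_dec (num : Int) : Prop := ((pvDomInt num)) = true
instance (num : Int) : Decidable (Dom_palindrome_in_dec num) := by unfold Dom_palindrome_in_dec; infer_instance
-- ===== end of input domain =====

-- ===== PORT A =====
-- B is a two-pass rewrite of A's fused recursion (same O(d) cost; objective: alternative).
def palindrome_in_dec (num : Int) : Bool :=
  if num < 10 then true
  else if PySem.Int.mod num 10 = 0 ∧ num ≥ 10 then false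
  else if PySem.Int.mod num 10 = PySem.Int.mod (PySem.Int.floordiv num 10) 10 then true
  else palindrome_in_dec (PySem.Int.floordiv num 10)
termination_by num.toNat
decreasing_by
  rename_i h _ _
  rw [PySem.Int.floordiv_eq_ediv_of_pos (by omega)]
  omega

-- ===== PORT B =====
-- first pass of Source B: the 'while n >= 10' loop building the least-significant-first digit list
def pvDigitsB (n : Int) : List Int :=
  if n ≥ 10 then PySem.Int.mod n 10 :: pvDigitsB (PySem.Int.floordiv n 10)
  else [n]
termination_by n.toNat
decreasing_by
  rename_i h
  rw [PySem.Int.floordiv_eq_ediv_of_pos (by omega)]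
  omega

-- second pass of Source B: the index loop over adjacent pairs, as structural recursion on the list
def pvScanB : List Int → Bool
  | a :: b :: rest =>
      if a = 0 then false
      else if a = b then true
      else pvScanB (b :: rest)
  | _ => true

def palindrome_in_dec_alt (num : Int) : Bool := pvScanB (pvDigitsB num)

-- ===== PRECONDITION & SPEC =====
def Spec_palindrome_in_dec (num : Int) (out : Bool) : Prop := out = palindrome_in_dec_alt num
instance (num : Int) (out : Bool) : Decidable (Spec_palindrome_in_dec num out) := by unfold Spec_palindrome_in_dec; infer_instance

-- ===== CLAIM (what is proved, stated in full; the proofs are below) =====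
def Claim_equal_palindrome_in_dec : Prop := ∀ (num : Int), Dom_palindrome_in_dec num → Spec_palindrome_in_dec num (palindrome_in_dec num)

-- ===== LEMMAS AND PROOFS =====

-- the head of the digit list is the current last digit (as A compares it): q % 10 if q ≥ 10, else q itself
theorem pvDigitsB_head (q : Int) :
    ∃ rest, pvDigitsB q = (if q ≥ 10 then PySem.Int.mod q 10 else q) :: rest := by
  by_cases h : q ≥ 10
  · exact ⟨pvDigitsB (PySem.Int.floordiv q 10), by rw [pvDigitsB, if_pos h, if_pos h]⟩
  · exact ⟨[], by rw [pvDigitsB, if_neg h, if_neg h]⟩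

theorem pv_agree (num : Int) : palindrome_in_dec num = pvScanB (pvDigitsB num) := by
  rw [palindrome_in_dec, pvDigitsB]
  by_cases h : num < 10
  · simp [h, show ¬ num ≥ 10 by omega, pvScanB]
  · have h10 : num ≥ 10 := by omega
    set q := PySem.Int.floordiv num 10 with hq
    have hqpos : 1 ≤ q := by
      rw [hq, PySem.Int.floordiv_eq_ediv_of_pos (by omega)]
      omega
    obtain ⟨rest, hrest⟩ := pvDigitsB_head q
    have hhead : (if q ≥ 10 then PySem.Int.mod q 10 else q) = PySem.Int.mod q 10 := by
      by_cases hq10 : q ≥ 10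
      · simp [hq10]
      · rw [if_neg hq10, PySem.Int.mod_eq_emod_of_pos (by omega : (0:Int) < 10)]
        omega
    rw [hhead] at hrest
    have hrec : palindrome_in_dec q = pvScanB (pvDigitsB q) := pv_agree q
    rw [if_neg h, if_pos h10, hrest]
    simp only [pvScanB]
    by_cases hz : PySem.Int.mod num 10 = 0
    · rw [if_pos ⟨hz, h10⟩, if_pos hz]
    · rw [if_neg (by tauto), if_neg hz]
      by_cases hp : PySem.Int.mod num 10 = PySem.Int.mod q 10
      · rw [if_pos hp, if_pos hp]
      · rw [if_neg hp, if_neg hp, hrec, hrest]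
termination_by num.toNat
decreasing_by
  rw [PySem.Int.floordiv_eq_ediv_of_pos (by omega)]
  omega

-- ===== VERDICT (by name: the statement is the Claim_ definition above) =====
theorem palindrome_in_dec_spec : Claim_equal_palindrome_in_dec := by
  intro num _
  unfold Spec_palindrome_in_dec palindrome_in_dec_alt
  exact pv_agree num
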